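-- pv_equiv track=rewrite | github.com/akio7624/YomeiriTools | utils/Utils.py | get_archive_padding_count
-- ===== SOURCE A (Python) =====
-- def get_archive_padding_count(pad_type: int, size: int) -> int:
--     if pad_type == 1:
--         unit = 2048
--     elif pad_type == 2:
--         unit = 512
--     else:
--         unit = None
--
--     if size % unit == 0:
--         return 0
--
--     n = int(size / unit)
--
--     while True:
--         block_size = (n * unit)
--         if size <= block_size:
--             return block_size - size
--         n += 1
-- ===== SOURCE B (Python) =====
-- def get_archive_padding_count(pad_type: int, size: int) -> int:
--     if pad_type == 1:
--         unit = 2048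
--     elif pad_type == 2:
--         unit = 512
--     else:
--         unit = None
--     return (-size) % unit
-- ===== Notes on version B (the rewrite author's own statement) =====
-- stated objective: simpler
-- what changed: Replaces A's divisibility check plus float-seeded upward-searching while-loop with the single closed form (-size) % unit, keeping the same pad_type->unit mapping (so pad_type outside {1,2} still raises TypeError).
import Mathlib
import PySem

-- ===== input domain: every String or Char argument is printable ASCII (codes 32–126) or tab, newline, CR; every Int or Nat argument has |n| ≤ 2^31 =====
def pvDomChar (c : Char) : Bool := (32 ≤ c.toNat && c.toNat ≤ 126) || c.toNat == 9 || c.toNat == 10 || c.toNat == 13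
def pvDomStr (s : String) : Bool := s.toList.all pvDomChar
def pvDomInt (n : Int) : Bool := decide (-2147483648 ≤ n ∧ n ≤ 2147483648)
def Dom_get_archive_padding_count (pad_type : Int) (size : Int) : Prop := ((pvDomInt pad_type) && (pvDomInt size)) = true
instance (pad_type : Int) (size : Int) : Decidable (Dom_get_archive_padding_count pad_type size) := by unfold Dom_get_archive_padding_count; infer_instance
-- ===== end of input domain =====

-- B replaces A's upward-searching while-loop by the closed form (-size) % unit (objective: simpler).

-- ===== PORT A =====
-- A's `while True: block_size = n*unit; if size <= block_size: return block_size - size; n += 1`,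
-- terminating because size - n*unit strictly decreases by unit > 0 each step.
def padLoop (unit size n : Int) (hu : 0 < unit) : Int :=
  if size ≤ n * unit then n * unit - size
  else padLoop unit size (n + 1) hu
termination_by (size - n * unit).toNat
decreasing_by simp only [Int.add_mul, Int.one_mul]; omega

-- `int(size / unit)` is exact truncated division here (unit is a power of two, |size| ≤ 2^31,
-- so the float quotient is exact): Int.tdiv. The `unit = None` branch raises TypeError in
-- Python (excluded by Pre_); the port returns 0 there.
def get_archive_padding_count (pad_type : Int) (size : Int) : Int :=
  if pad_type = 1 then
    if PySem.Int.mod size 2048 = 0 then 0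
    else padLoop 2048 size (size.tdiv 2048) (by decide)
  else if pad_type = 2 then
    if PySem.Int.mod size 512 = 0 then 0
    else padLoop 512 size (size.tdiv 512) (by decide)
  else 0

-- ===== PORT B =====
-- `return (-size) % unit`; the `unit = None` branch raises TypeError in Python (excluded by Pre_).
def get_archive_padding_count_alt (pad_type : Int) (size : Int) : Int :=
  let unit : Option Int := if pad_type = 1 then some 2048 else if pad_type = 2 then some 512 else none
  match unit with
  | some u => PySem.Int.mod (-size) u
  | none => 0

-- ===== PRECONDITION & SPEC =====
-- Pre_ excludes pad_type ∉ {1, 2}: there both A and B set unit = None and raise TypeError on `% None`.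
def Pre_get_archive_padding_count (pad_type : Int) (size : Int) : Prop :=
  pad_type = 1 ∨ pad_type = 2
instance (pad_type : Int) (size : Int) : Decidable (Pre_get_archive_padding_count pad_type size) := by
  unfold Pre_get_archive_padding_count; infer_instance

def pvWitness_get_archive_padding_count : Int × Int := (2, 100)

def Spec_get_archive_padding_count (pad_type : Int) (size : Int) (out : Int) : Prop := out = get_archive_padding_count_alt pad_type size
instance (pad_type : Int) (size : Int) (out : Int) : Decidable (Spec_get_archive_padding_count pad_type size out) := by unfold Spec_get_archive_padding_count; infer_instance

-- ===== CLAIM (what is proved, stated in full; the proofs are below) =====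
def Claim_equal_get_archive_padding_count : Prop := ∀ (pad_type : Int) (size : Int), Dom_get_archive_padding_count pad_type size → Pre_get_archive_padding_count pad_type size → Spec_get_archive_padding_count pad_type size (get_archive_padding_count pad_type size)

-- ===== LEMMAS AND PROOFS =====

-- As long as n has not yet passed the first multiple of unit that is ≥ size
-- (i.e. n*unit < size + unit), the loop returns exactly (-size) % unit.
theorem padLoop_eq (unit size n : Int) (hu : 0 < unit) (hn : n * unit < size + unit) :
    padLoop unit size n hu = (-size) % unit := by
  fun_induction padLoop unit size n hu with
  | case1 n h =>
    have h1 : (-size + unit * n) % unit = (-size) % unit := Int.add_mul_emod_self_left _ _ _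
    have h2 : (n * unit - size) % unit = n * unit - size :=
      Int.emod_eq_of_lt (by omega) (by omega)
    calc n * unit - size = (n * unit - size) % unit := h2.symm
      _ = (-size + unit * n) % unit := by ring_nf
      _ = (-size) % unit := h1
  | case2 n h ih =>
    apply ih
    have : (n + 1) * unit = n * unit + unit := by ring
    omega

theorem padLoop_tdiv_eq (unit size : Int) (hu : 0 < unit) :
    padLoop unit size (size.tdiv unit) hu = (-size) % unit := by
  apply padLoop_eq
  have h1 := Int.mul_tdiv_add_tmod size unit
  have h2 := Int.lt_tmod_of_pos size hu
  have h3 : size.tdiv unit * unit = unit * size.tdiv unit := Int.mul_comm _ _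
  omega

-- ===== VERDICT (by name: the statement is the Claim_ definition above) =====
theorem get_archive_padding_count_spec : Claim_equal_get_archive_padding_count := by
  intro pad_type size _ hpre
  unfold Spec_get_archive_padding_count get_archive_padding_count get_archive_padding_count_alt
  rcases hpre with h | h <;> subst h
  · show (if PySem.Int.mod size 2048 = 0 then 0
        else padLoop 2048 size (size.tdiv 2048) (by decide)) = PySem.Int.mod (-size) 2048
    rw [PySem.Int.mod_eq_emod_of_pos (by decide), PySem.Int.mod_eq_emod_of_pos (by decide)]
    split_ifs with h0
    · omega
    · exact padLoop_tdiv_eq 2048 size (by decide)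
  · show (if PySem.Int.mod size 512 = 0 then 0
        else padLoop 512 size (size.tdiv 512) (by decide)) = PySem.Int.mod (-size) 512
    rw [PySem.Int.mod_eq_emod_of_pos (by decide), PySem.Int.mod_eq_emod_of_pos (by decide)]
    split_ifs with h0
    · omega
    · exact padLoop_tdiv_eq 512 size (by decide)
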